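-- pv_equiv track=rewrite | github.com/adnancrnovrsanin/pAIthonGamesAPI | base/MaxNAI.py | difference_of_density
-- ===== SOURCE A (Python) =====
-- from collections import deque
--
-- def move_is_valid(board, row, col):
--     if row < 0 or row >= len(board):
--         return False
--     if col < 0 or col >= len(board[0]):
--         return False
--     if board[row][col] != 'r':
--         return False
--     return True
--
-- def get_all_players(board):
--     players = []
--     for row in range(len(board)):
--         for col in range(len(board[0])):
--             try:
--                 tmp = int(board[row][col])
--                 players.append(board[row][col])
--             except:
--                 continue
--     return players
--
-- def get_next_nodes(board, x, y):
--     check_next_node = lambda x, y: move_is_valid(board, x, y)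
--     ways = [(-1, 0), (+1, 0), (0, -1), (0, +1), (-1, -1), (-1, +1), (+1, -1), (+1, +1)]
--     return [(x + dx, y + dy) for dx, dy in ways if check_next_node(x + dx, y + dy)]
--
-- def bfsSum(startRow, startCol, board):
--     graph = {}
--     for x, row in enumerate(board):
--         for y, col in enumerate(row):
--             graph[(x, y)] = graph.get((x, y), []) + get_next_nodes(board, x, y)
--     queue = deque([(startRow, startCol, board[startRow][startCol])])
--     visited = {(startRow, startCol): None}
--
--     density = 0
--     while queue:
--         cur_node = queue.popleft()
--         if cur_node[2] == 'h':
--             continue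
--         if cur_node[2] == 'r':
--             density += 1
--
--
--         next_nodes = graph[(cur_node[0], cur_node[1])]
--         for next_node in next_nodes:
--             if next_node not in visited:
--                 queue.append((next_node[0], next_node[1], board[next_node[0]][next_node[1]]))
--                 visited[(next_node[0], next_node[1])] = cur_node
--     return density
--
-- def check_density(board, player):
--     density = 0
--     for row in range(len(board)):
--         for col in range(len(board[0])):
--             if board[row][col] == player:
--                 density += bfsSum(row, col, board)
--     return density
--
-- def difference_of_density(board, player):
--     difference = 0
--     for p in get_all_players(board):
--         if p == player:
--             difference += check_density(board, p)
--         else: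
--             difference -= check_density(board, p)
--     return difference
-- ===== SOURCE B (Python) =====
-- def difference_of_density(board, player):
--     # One pass: flood-fill the 'r'-mass touching each player cell once,
--     # aggregate per player value, then combine with signs.
--     if not board:
--         return 0
--     rows, cols = len(board), len(board[0])
--     offs = [(-1, 0), (1, 0), (0, -1), (0, 1), (-1, -1), (-1, 1), (1, -1), (1, 1)]
--
--     def mass(sr, sc):
--         # total number of 'r' cells in the regions touching (sr, sc), stack DFS
--         seen = set()
--         stack = [(sr + dx, sc + dy) for dx, dy in offs]
--         total = 0
--         while stack:
--             x, y = stack.pop()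
--             if (x, y) in seen:
--                 continue
--             if not (0 <= x < rows and 0 <= y < cols and board[x][y] == 'r'):
--                 continue
--             seen.add((x, y))
--             total += 1
--             for dx, dy in offs:
--                 stack.append((x + dx, y + dy))
--         return total
--
--     def is_player(v):
--         try:
--             int(v)
--             return True
--         except ValueError:
--             return False
--
--     values = []        # player value of each player cell, in scan order
--     per_value = {}     # player value -> sum of masses of its cells
--     for r in range(rows):
--         for c in range(cols):
--             v = board[r][c]
--             if is_player(v):
--                 values.append(v)
--                 per_value[v] = per_value.get(v, 0) + mass(r, c)
--     return sum(per_value[v] if v == player else -per_value[v] for v in values)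
-- ===== Notes on version B (the rewrite author's own statement) =====
-- stated objective: alternative
-- what changed: A rebuilds a full adjacency dict and reruns a BFS for every (player occurrence, matching cell) pair via per-player board rescans; B makes one board scan, flood-fills the adjacent 'r'-mass of each player cell exactly once with a stack DFS (no adjacency dict), aggregates the masses per player value in a dict, and combines them with signs in one final pass.
-- outside the precondition, e.g. on difference_of_density([['ab', 'cd'], ['ef']], '1'): A returns 0, B raises IndexError
import Mathlib
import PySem

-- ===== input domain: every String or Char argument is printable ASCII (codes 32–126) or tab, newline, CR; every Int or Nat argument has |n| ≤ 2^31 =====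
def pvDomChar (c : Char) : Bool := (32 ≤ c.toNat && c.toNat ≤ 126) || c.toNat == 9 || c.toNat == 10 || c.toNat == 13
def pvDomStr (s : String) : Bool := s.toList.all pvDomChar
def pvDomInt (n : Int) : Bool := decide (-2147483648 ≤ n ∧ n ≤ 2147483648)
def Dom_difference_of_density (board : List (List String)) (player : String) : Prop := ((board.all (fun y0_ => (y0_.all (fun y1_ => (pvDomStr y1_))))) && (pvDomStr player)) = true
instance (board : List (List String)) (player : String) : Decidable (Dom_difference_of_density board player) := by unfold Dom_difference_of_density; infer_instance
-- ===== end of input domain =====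

-- B replaces A's per-player BFS rescans (with a rebuilt adjacency dict per call) by one scan that
-- flood-fills each player cell's adjacent 'r'-mass once and aggregates per player value.


-- board[x][y]; the default "" is only reachable where Python would raise (excluded by Pre_) or
-- behind Python's own bounds guards / bare except (where the value is never used / skipped alike).
def pvCell (board : List (List String)) (x y : Int) : String :=
  PySem.List.pyGetD (PySem.List.pyGetD board x []) y ""

-- the eight neighbour offsets (A's `ways`, B's `offs` — the same literal list in both Pythons)
def pvOffs : List (Int × Int) := [(-1, 0), (1, 0), (0, -1), (0, 1), (-1, -1), (-1, 1), (1, -1), (1, 1)]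

-- ===== PORT A =====

def pvMoveIsValid (board : List (List String)) (row col : Int) : Bool :=
  if row < 0 || (board.length : Int) ≤ row then false
  else if col < 0 || ((board.headD []).length : Int) ≤ col then false
  else if pvCell board row col ≠ "r" then false
  else true

def pvGetAllPlayers (board : List (List String)) : List String :=
  (PySem.List.pyRange 0 board.length 1).foldl (fun players row =>
    (PySem.List.pyRange 0 (board.headD []).length 1).foldl (fun players col =>
      match PySem.Int.ofStr? (pvCell board row col) with
      | some _ => players ++ [pvCell board row col]
      | none => players) players) []

def pvGetNextNodes (board : List (List String)) (x y : Int) : List (Int × Int) :=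
  (pvOffs.filter (fun d => pvMoveIsValid board (x + d.1) (y + d.2))).map (fun d => (x + d.1, y + d.2))

def pvGraph (board : List (List String)) : PySem.Dict (Int × Int) (List (Int × Int)) :=
  (PySem.List.enumerate board 0).foldl (fun g p =>
    (PySem.List.enumerate p.2 0).foldl (fun g q =>
      g.insert (p.1, q.1) (g.getD (p.1, q.1) [] ++ pvGetNextNodes board p.1 q.1)) g)
    PySem.Dict.empty

-- the while loop of bfsSum; fuel only makes the recursion structural (proved sufficient below)
def pvBfsLoop (board : List (List String)) (graph : PySem.Dict (Int × Int) (List (Int × Int))) :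
    Nat → List (Int × Int × String) → PySem.Dict (Int × Int) (Option (Int × Int × String)) → Int → Int
  | 0, _, _, density => density
  | _ + 1, [], _, density => density
  | fuel + 1, cur :: queue, visited, density =>
    if cur.2.2 == "h" then pvBfsLoop board graph fuel queue visited density
    else
      let density := if cur.2.2 == "r" then density + 1 else density
      let nexts := graph.getD (cur.1, cur.2.1) []
      let qv := nexts.foldl
        (fun (qv : List (Int × Int × String) × PySem.Dict (Int × Int) (Option (Int × Int × String))) nn =>
          if qv.2.contains nn then qv
          else (qv.1 ++ [(nn.1, nn.2, pvCell board nn.1 nn.2)], qv.2.insert nn (some cur)))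
        (queue, visited)
      pvBfsLoop board graph fuel qv.1 qv.2 density

def pvBfsSum (startRow startCol : Int) (board : List (List String)) : Int :=
  let graph := pvGraph board
  pvBfsLoop board graph (board.length * (board.headD []).length + 2)
    [(startRow, startCol, pvCell board startRow startCol)]
    (PySem.Dict.empty.insert (startRow, startCol) none) 0

def pvCheckDensity (board : List (List String)) (player : String) : Int :=
  (PySem.List.pyRange 0 board.length 1).foldl (fun density row =>
    (PySem.List.pyRange 0 (board.headD []).length 1).foldl (fun density col =>
      if pvCell board row col == player then density + pvBfsSum row col board else density)
      density) 0

def difference_of_density (board : List (List String)) (player : String) : Int :=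
  (pvGetAllPlayers board).foldl (fun difference p =>
    if p == player then difference + pvCheckDensity board p
    else difference - pvCheckDensity board p) 0

-- ===== PORT B =====

def pvInGridR (board : List (List String)) (rows cols : Int) (c : Int × Int) : Bool :=
  0 ≤ c.1 && c.1 < rows && 0 ≤ c.2 && c.2 < cols && pvCell board c.1 c.2 == "r"

-- the while loop of B's mass(): Python's end-of-list stack is held head-first (push = cons, pop = head),
-- so a block of appends becomes a reversed prepend; fuel only makes the recursion structural.
def pvMassLoop (board : List (List String)) (rows cols : Int) :
    Nat → List (Int × Int) → PySem.Set (Int × Int) → Int → Int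
  | 0, _, _, total => total
  | _ + 1, [], _, total => total
  | fuel + 1, c :: stack, seen, total =>
    if PySem.Set.contains seen c then pvMassLoop board rows cols fuel stack seen total
    else if !pvInGridR board rows cols c then pvMassLoop board rows cols fuel stack seen total
    else pvMassLoop board rows cols fuel
      ((pvOffs.map (fun d => (c.1 + d.1, c.2 + d.2))).reverse ++ stack)
      (PySem.Set.add seen c) (total + 1)

def pvMass (board : List (List String)) (rows cols : Int) (sr sc : Int) : Int :=
  pvMassLoop board rows cols (8 * (rows.toNat * cols.toNat + 1) + 1)
    ((pvOffs.map (fun d => (sr + d.1, sc + d.2))).reverse) PySem.Set.empty 0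

def pvIsPlayer (v : String) : Bool := (PySem.Int.ofStr? v).isSome

def difference_of_density_alt (board : List (List String)) (player : String) : Int :=
  if board.length == 0 then 0
  else
    let rows : Int := board.length
    let cols : Int := (board.headD []).length
    let st := (PySem.List.pyRange 0 rows 1).foldl
      (fun (st : List String × PySem.Dict String Int) r =>
        (PySem.List.pyRange 0 cols 1).foldl (fun st c =>
          if pvIsPlayer (pvCell board r c) then
            (st.1 ++ [pvCell board r c],
             st.2.insert (pvCell board r c)
               (st.2.getD (pvCell board r c) 0 + pvMass board rows cols r c))
          else st) st)
      ([], PySem.Dict.empty)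
    st.1.foldl (fun acc v =>
      acc + (if v == player then st.2.getD v 0 else -(st.2.getD v 0))) 0

-- ===== PRECONDITION & SPEC =====
-- Pre_ excludes ragged boards with a row shorter than row 0: there A raises IndexError as soon as a
-- player cell exists, and in the playerless corner returns 0 only because its bare `except` swallows
-- the same IndexError (B naturally raises there).
def Pre_difference_of_density (board : List (List String)) (player : String) : Prop :=
  ∀ row ∈ board, (board.headD []).length ≤ row.length
instance (board : List (List String)) (player : String) : Decidable (Pre_difference_of_density board player) := by unfold Pre_difference_of_density; infer_instance

def pvWitness_difference_of_density : List (List String) × String := ([["1", "r"], ["r", "2"]], "1")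

def Spec_difference_of_density (board : List (List String)) (player : String) (out : Int) : Prop := out = difference_of_density_alt board player
instance (board : List (List String)) (player : String) (out : Int) : Decidable (Spec_difference_of_density board player out) := by unfold Spec_difference_of_density; infer_instance

-- ===== CLAIM (what is proved, stated in full; the proofs are below) =====
def Claim_equal_difference_of_density : Prop := ∀ (board : List (List String)) (player : String), Dom_difference_of_density board player → Pre_difference_of_density board player → Spec_difference_of_density board player (difference_of_density board player)


-- ===== LEMMAS AND PROOFS =====

-- ---- geometric spec layer ----
def pvNbrs (p : Int × Int) : List (Int × Int) := pvOffs.map (fun d => (p.1 + d.1, p.2 + d.2))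

def pvRc (board : List (List String)) (p : Int × Int) : Bool :=
  pvInGridR board board.length (board.headD []).length p

-- reachable 'r' cells: the r-neighbours of s, closed under r-adjacency
inductive pvReach (board : List (List String)) (s : Int × Int) : Int × Int → Prop
  | base (q : Int × Int) (hq : q ∈ pvNbrs s) (h : pvRc board q = true) : pvReach board s q
  | step (p q : Int × Int) (hp : pvReach board s p) (hq : q ∈ pvNbrs p) (h : pvRc board q = true) :
      pvReach board s q

def pvGrid (board : List (List String)) : List (Int × Int) :=
  (PySem.List.pyRange 0 board.length 1).flatMap
    (fun x => (PySem.List.pyRange 0 (board.headD []).length 1).map (fun y => (x, y)))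

lemma pvRc_iff (board : List (List String)) (p : Int × Int) :
    pvRc board p = true ↔ 0 ≤ p.1 ∧ p.1 < (board.length : Int) ∧ 0 ≤ p.2 ∧
      p.2 < ((board.headD []).length : Int) ∧ pvCell board p.1 p.2 = "r" := by
  simp [pvRc, pvInGridR, and_assoc]

lemma moveIsValid_eq_pvRc (board : List (List String)) (x y : Int) :
    pvMoveIsValid board x y = pvRc board (x, y) := by
  simp only [pvMoveIsValid, pvRc, pvInGridR]
  split_ifs <;> simp_all <;> omega

lemma getNextNodes_eq (board : List (List String)) (x y : Int) :
    pvGetNextNodes board x y = (pvNbrs (x, y)).filter (pvRc board) := by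
  show _ = (pvOffs.map _).filter _
  rw [List.filter_map]
  simp only [pvGetNextNodes, Function.comp_def, moveIsValid_eq_pvRc]

lemma mem_pvGrid_of_rc (board : List (List String)) (p : Int × Int) (h : pvRc board p = true) :
    p ∈ pvGrid board := by
  rcases pvRc_iff board p |>.mp h with ⟨h1, h2, h3, h4, _⟩
  simp only [pvGrid, List.mem_flatMap, List.mem_map]
  exact ⟨p.1, by rw [PySem.List.mem_pyRange_one]; exact ⟨h1, h2⟩,
    p.2, by rw [PySem.List.mem_pyRange_one]; exact ⟨h3, h4⟩, rfl⟩

lemma pvGrid_length (board : List (List String)) :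
    (pvGrid board).length = board.length * (board.headD []).length := by
  simp [pvGrid, List.length_flatMap, PySem.List.length_pyRange_one, List.map_const']

lemma length_le_grid (board : List (List String)) (l : List (Int × Int)) (hnd : l.Nodup)
    (hsub : ∀ p ∈ l, p ∈ pvGrid board) :
    l.length ≤ board.length * (board.headD []).length := by
  rw [← pvGrid_length]
  exact (List.subperm_of_subset hnd hsub).length_le

lemma pvReach_rc (board : List (List String)) (s p : Int × Int) (h : pvReach board s p) :
    pvRc board p = true := by
  cases h <;> assumption


-- ---- B side: the DFS loop computes |Reach s| ----
lemma pvMassLoop_spec (board : List (List String)) (s : Int × Int) :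
    ∀ (fuel : Nat) (stack : List (Int × Int)) (seen : PySem.Set (Int × Int)) (total : Int),
    seen.Nodup →
    (∀ p ∈ seen, pvReach board s p) →
    (∀ p ∈ stack, pvRc board p = true → pvReach board s p) →
    (∀ q ∈ pvNbrs s, pvRc board q = true → q ∈ seen ∨ q ∈ stack) →
    (∀ p ∈ seen, ∀ q ∈ pvNbrs p, pvRc board q = true → q ∈ seen ∨ q ∈ stack) →
    stack.length + 8 * (board.length * (board.headD []).length - seen.length) < fuel →
    ∃ K : List (Int × Int), K.Nodup ∧ (∀ p, p ∈ K ↔ pvReach board s p) ∧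
      pvMassLoop board board.length (board.headD []).length fuel stack seen total
        = total + K.length - seen.length := by
  intro fuel
  induction fuel with
  | zero => intro stack seen total _ _ _ _ _ hμ; omega
  | succ fuel ih =>
    intro stack seen total h1 h2 h3 h4 h5 hμ
    match stack with
    | [] =>
      refine ⟨seen, h1, ?_, by simp [pvMassLoop]⟩
      intro p
      refine ⟨h2 p, ?_⟩
      intro hp
      induction hp with
      | base q hq h => exact (h4 q hq h).resolve_right (by simp)
      | step p q hp hq h ihr => exact (h5 p ihr q hq h).resolve_right (by simp)
    | c :: stack =>
      by_cases hc : c ∈ seen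
      · have hstep : pvMassLoop board board.length (board.headD []).length (fuel + 1) (c :: stack) seen total
            = pvMassLoop board board.length (board.headD []).length fuel stack seen total := by
          have hct : PySem.Set.contains seen c = true := (PySem.Set.contains_iff seen c).mpr hc
          simp only [pvMassLoop]
          rw [hct]
          simp
        rw [hstep]
        refine ih stack seen total h1 h2 (fun p hp => h3 p (by simp [hp])) ?_ ?_ (by simp at hμ ⊢; omega)
        · intro q hq hrc
          rcases h4 q hq hrc with h | h
          · exact Or.inl h
          · rcases List.mem_cons.mp h with rfl | h
            · exact Or.inl hc
            · exact Or.inr h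
        · intro p hp q hq hrc
          rcases h5 p hp q hq hrc with h | h
          · exact Or.inl h
          · rcases List.mem_cons.mp h with rfl | h
            · exact Or.inl hc
            · exact Or.inr h
      · have hcb : PySem.Set.contains seen c = false := by
          by_contra h
          exact hc ((PySem.Set.contains_iff seen c).mp (by revert h; cases PySem.Set.contains seen c <;> simp))
        by_cases hrc : pvRc board c = true
        · -- fresh r-cell: absorb it
          have hreach : pvReach board s c := h3 c (by simp) hrc
          have hseen' : PySem.Set.add seen c = seen ++ [c] := PySem.Set.add_of_not_mem hc
          have hlen : (seen ++ [c]).length ≤ board.length * (board.headD []).length := by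
            refine length_le_grid board _ ?_ ?_
            · rw [List.nodup_append]
              refine ⟨h1, List.nodup_singleton _, ?_⟩
              intro a ha b hb
              cases List.mem_singleton.mp hb
              exact fun h => hc (h ▸ ha)
            · intro p hp
              rcases List.mem_append.mp hp with hp | hp
              · exact mem_pvGrid_of_rc board p (pvReach_rc board s p (h2 p hp))
              · simp at hp; subst hp; exact mem_pvGrid_of_rc board p hrc
          have hstep : pvMassLoop board board.length (board.headD []).length (fuel + 1) (c :: stack) seen total
              = pvMassLoop board board.length (board.headD []).length fuel
                  ((pvOffs.map (fun d => (c.1 + d.1, c.2 + d.2))).reverse ++ stack)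
                  (seen ++ [c]) (total + 1) := by
            have hrcg : pvInGridR board (board.length : Int) ((board.headD []).length : Int) c = true := hrc
            simp only [pvMassLoop]
            rw [hcb, hrcg, hseen']
            simp
          rw [hstep]
          have hnb : (pvOffs.map (fun d => (c.1 + d.1, c.2 + d.2))).reverse = (pvNbrs c).reverse := rfl
          rw [hnb]
          obtain ⟨K, hK1, hK2, hK3⟩ := ih ((pvNbrs c).reverse ++ stack) (seen ++ [c]) (total + 1)
            (by rw [List.nodup_append]
                refine ⟨h1, List.nodup_singleton _, ?_⟩
                intro a ha b hb
                cases List.mem_singleton.mp hb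
                exact fun h => hc (h ▸ ha))
            (by intro p hp
                rcases List.mem_append.mp hp with hp | hp
                · exact h2 p hp
                · simp at hp; subst hp; exact hreach)
            (by intro p hp hrcp
                rcases List.mem_append.mp hp with hp | hp
                · exact pvReach.step c p hreach (List.mem_reverse.mp hp) hrcp
                · exact h3 p (by simp [hp]) hrcp)
            (by intro q hq hrcq
                rcases h4 q hq hrcq with h | h
                · exact Or.inl (by simp [h])
                · rcases List.mem_cons.mp h with rfl | h
                  · exact Or.inl (by simp)
                  · exact Or.inr (by simp [h]))
            (by intro p hp q hq hrcq
                rcases List.mem_append.mp hp with hp | hp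
                · rcases h5 p hp q hq hrcq with h | h
                  · exact Or.inl (by simp [h])
                  · rcases List.mem_cons.mp h with rfl | h
                    · exact Or.inl (by simp)
                    · exact Or.inr (by simp [h])
                · simp at hp; subst hp
                  exact Or.inr (by simp [List.mem_reverse.mpr, hq]))
            (by
              have h8 : (pvNbrs c).length = 8 := rfl
              have hlen' : seen.length + 1 ≤ board.length * (board.headD []).length := by
                simpa using hlen
              simp only [List.length_append, List.length_reverse, h8, List.length_cons,
                List.length_nil] at hμ ⊢
              omega)
          refine ⟨K, hK1, hK2, ?_⟩
          rw [hK3]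
          simp
          omega
        · -- not an r cell (or out of bounds): skip
          have hrcf : pvRc board c = false := by revert hrc; cases pvRc board c <;> simp
          have hstep : pvMassLoop board board.length (board.headD []).length (fuel + 1) (c :: stack) seen total
              = pvMassLoop board board.length (board.headD []).length fuel stack seen total := by
            have hrcg : pvInGridR board (board.length : Int) ((board.headD []).length : Int) c = false := hrcf
            simp only [pvMassLoop]
            rw [hcb, hrcg]
            simp
          rw [hstep]
          refine ih stack seen total h1 h2 (fun p hp => h3 p (by simp [hp])) ?_ ?_ (by simp at hμ ⊢; omega)
          · intro q hq hq2
            rcases h4 q hq hq2 with h | h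
            · exact Or.inl h
            · rcases List.mem_cons.mp h with rfl | h
              · exact absurd hq2 (by simp [hrcf])
              · exact Or.inr h
          · intro p hp q hq hq2
            rcases h5 p hp q hq hq2 with h | h
            · exact Or.inl h
            · rcases List.mem_cons.mp h with rfl | h
              · exact absurd hq2 (by simp [hrcf])
              · exact Or.inr h

lemma pvMass_spec (board : List (List String)) (sr sc : Int) :
    ∃ K : List (Int × Int), K.Nodup ∧ (∀ p, p ∈ K ↔ pvReach board (sr, sc) p) ∧
      pvMass board board.length (board.headD []).length sr sc = K.length := by
  obtain ⟨K, h1, h2, h3⟩ := pvMassLoop_spec board (sr, sc)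
      (8 * (((board.length : Int)).toNat * (((board.headD []).length : Int)).toNat + 1) + 1)
      ((pvNbrs (sr, sc)).reverse) PySem.Set.empty 0
      (by simp [PySem.Set.empty])
      (by simp [PySem.Set.empty])
      (fun p hp hrc => pvReach.base p (List.mem_reverse.mp hp) hrc)
      (fun q hq _ => Or.inr (List.mem_reverse.mpr hq))
      (by simp [PySem.Set.empty])
      (by
        have h8 : (pvNbrs (sr, sc)).length = 8 := rfl
        simp [PySem.Set.empty, h8]
        omega)
  refine ⟨K, h1, h2, ?_⟩
  have hs : (pvOffs.map (fun d => (sr + d.1, sc + d.2))).reverse = (pvNbrs (sr, sc)).reverse := rfl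
  rw [pvMass, hs]
  rw [h3]
  simp

-- ---- A side: the adjacency dict built by bfsSum maps each enumerated cell to its valid neighbours ----
lemma graph_inner_get? (board : List (List String)) (cs : List String) :
    ∀ (k : Int) (g : PySem.Dict (Int × Int) (List (Int × Int))) (i : Int),
    (∀ y : Int, k ≤ y → g.get? (i, y) = none) → ∀ (x y : Int),
    ((PySem.List.enumerate cs k).foldl
        (fun g q => g.insert (i, q.1) (g.getD (i, q.1) [] ++ pvGetNextNodes board i q.1)) g).get? (x, y)
      = if x = i ∧ k ≤ y ∧ y < k + cs.length then some (pvGetNextNodes board i y)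
        else g.get? (x, y) := by
  induction cs with
  | nil =>
    intro k g i hg x y
    rw [if_neg (by rintro ⟨rfl, h1, h2⟩; simp at h2; omega)]
    simp [PySem.List.enumerate_nil]
  | cons c cs ih =>
    intro k g i hg x y
    rw [PySem.List.enumerate_cons, List.foldl_cons]
    have hgetD : g.getD (i, k) [] = [] :=
      PySem.Dict.getD_of_get?_eq_none g [] (hg k le_rfl)
    rw [ih (k + 1) _ i ?fresh x y]
    case fresh =>
      intro y' hy'
      rw [PySem.Dict.get?_insert_of_ne _ _ (by simp; omega)]
      exact hg y' (by omega)
    by_cases hx : x = i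
    · subst hx
      by_cases hyk : y = k
      · subst hyk
        rw [if_neg (by omega), if_pos ⟨rfl, le_refl _, by simp only [List.length_cons]; push_cast; omega⟩,
            PySem.Dict.get?_insert_self, hgetD, List.nil_append]
      · by_cases hcond : k + 1 ≤ y ∧ y < k + 1 + (cs.length : Int)
        · rw [if_pos ⟨rfl, hcond.1, hcond.2⟩,
              if_pos ⟨rfl, by omega, by simp only [List.length_cons]; push_cast; omega⟩]
        · rw [if_neg (by rintro ⟨_, h1, h2⟩; exact hcond ⟨h1, h2⟩),
              if_neg (by rintro ⟨_, h1, h2⟩; simp at h2; omega),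
              PySem.Dict.get?_insert_of_ne _ _ (by simp; omega)]
    · rw [if_neg (by rintro ⟨rfl, _⟩; exact hx rfl), if_neg (by rintro ⟨rfl, _⟩; exact hx rfl),
          PySem.Dict.get?_insert_of_ne _ _ (by simp [hx])]

lemma graph_outer_get? (board : List (List String)) (bs : List (List String)) :
    ∀ (k : Int) (g : PySem.Dict (Int × Int) (List (Int × Int))),
    (∀ x y : Int, k ≤ x → g.get? (x, y) = none) → ∀ (x y : Int),
    ((PySem.List.enumerate bs k).foldl
        (fun g p => (PySem.List.enumerate p.2 0).foldl
          (fun g q => g.insert (p.1, q.1) (g.getD (p.1, q.1) [] ++ pvGetNextNodes board p.1 q.1)) g)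
        g).get? (x, y)
      = if k ≤ x ∧ x < k + bs.length ∧ 0 ≤ y ∧ y < ((bs.getD (x - k).toNat []).length : Int)
        then some (pvGetNextNodes board x y) else g.get? (x, y) := by
  induction bs with
  | nil =>
    intro k g hg x y
    rw [if_neg (by rintro ⟨h1, h2, _⟩; simp at h2; omega)]
    simp [PySem.List.enumerate_nil]
  | cons b bs ih =>
    intro k g hg x y
    rw [PySem.List.enumerate_cons, List.foldl_cons]
    rw [ih (k + 1) _ ?fresh x y]
    case fresh =>
      intro x' y' hx'
      rw [graph_inner_get? board b 0 g k (fun y'' _ => hg k y'' le_rfl) x' y',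
          if_neg (by rintro ⟨rfl, _⟩; omega)]
      exact hg x' y' (by omega)
    rw [graph_inner_get? board b 0 g k (fun y'' _ => hg k y'' le_rfl) x y]
    by_cases hx : x = k
    · subst hx
      have h0 : (x - x).toNat = 0 := by omega
      rw [h0, List.getD_cons_zero]
      simp only [List.length_cons]
      split_ifs <;> first | rfl | (exfalso; omega) | (exfalso; simp only [true_and] at *; omega)
    · by_cases hcond : k + 1 ≤ x ∧ x < k + 1 + (bs.length : Int)
      · have ht : (x - k).toNat = (x - (k + 1)).toNat + 1 := by omega
        rw [show ((b :: bs).getD (x - k).toNat []) = bs.getD (x - (k + 1)).toNat [] from by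
          rw [ht]; rfl]
        simp only [List.length_cons]
        split_ifs <;> first | rfl | (exfalso; omega) | (exfalso; simp only [true_and] at *; omega)
      · simp only [List.length_cons]
        split_ifs <;> first | rfl | (exfalso; omega) | (exfalso; simp only [true_and] at *; omega)

lemma pvGraph_getD (board : List (List String))
    (hPre : ∀ row ∈ board, (board.headD []).length ≤ row.length) (x y : Int)
    (hx1 : 0 ≤ x) (hx2 : x < (board.length : Int)) (hy1 : 0 ≤ y)
    (hy2 : y < ((board.headD []).length : Int)) :
    (pvGraph board).getD (x, y) [] = pvGetNextNodes board x y := by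
  have hmem : board.getD x.toNat [] ∈ board := by
    have hlt : x.toNat < board.length := by omega
    rw [List.getD_eq_getElem board [] hlt]
    exact List.getElem_mem hlt
  have hrow : ((board.headD []).length : Int) ≤ ((board.getD x.toNat []).length : Int) := by
    exact_mod_cast hPre _ hmem
  have hchar := graph_outer_get? board board 0 PySem.Dict.empty (by simp) x y
  have h0 : x - 0 = x := by omega
  rw [h0, if_pos ⟨hx1, by simpa using hx2, hy1, by omega⟩] at hchar
  simp only [pvGraph]
  rw [PySem.Dict.getD_eq_get?_getD, hchar]
  rfl

-- ---- A side: one expansion step of the BFS (the inner for-loop over the neighbour list) ----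
lemma bfs_enqueue (board : List (List String)) (cur : Int × Int × String) :
    ∀ (ns : List (Int × Int)) (queue : List (Int × Int × String))
      (visited : PySem.Dict (Int × Int) (Option (Int × Int × String))),
    visited.keys.Nodup →
    (∀ nn ∈ ns, pvRc board nn = true) →
    (ns.foldl
        (fun (qv : List (Int × Int × String) × PySem.Dict (Int × Int) (Option (Int × Int × String))) nn =>
          if qv.2.contains nn then qv
          else (qv.1 ++ [(nn.1, nn.2, pvCell board nn.1 nn.2)], qv.2.insert nn (some cur)))
        (queue, visited)).2.keys.Nodup ∧
    (∀ k, k ∈ (ns.foldl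
        (fun (qv : List (Int × Int × String) × PySem.Dict (Int × Int) (Option (Int × Int × String))) nn =>
          if qv.2.contains nn then qv
          else (qv.1 ++ [(nn.1, nn.2, pvCell board nn.1 nn.2)], qv.2.insert nn (some cur)))
        (queue, visited)).2.keys ↔ k ∈ visited.keys ∨ k ∈ ns) ∧
    (∀ e ∈ (ns.foldl
        (fun (qv : List (Int × Int × String) × PySem.Dict (Int × Int) (Option (Int × Int × String))) nn =>
          if qv.2.contains nn then qv
          else (qv.1 ++ [(nn.1, nn.2, pvCell board nn.1 nn.2)], qv.2.insert nn (some cur)))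
        (queue, visited)).1, e ∈ queue ∨ ((e.1, e.2.1) ∈ ns ∧ e.2.2 = pvCell board e.1 e.2.1 ∧
          (e.1, e.2.1) ∈ (ns.foldl
        (fun (qv : List (Int × Int × String) × PySem.Dict (Int × Int) (Option (Int × Int × String))) nn =>
          if qv.2.contains nn then qv
          else (qv.1 ++ [(nn.1, nn.2, pvCell board nn.1 nn.2)], qv.2.insert nn (some cur)))
        (queue, visited)).2.keys)) ∧
    (∀ nn ∈ ns, nn ∈ visited.keys ∨ ∃ e ∈ (ns.foldl
        (fun (qv : List (Int × Int × String) × PySem.Dict (Int × Int) (Option (Int × Int × String))) nn =>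
          if qv.2.contains nn then qv
          else (qv.1 ++ [(nn.1, nn.2, pvCell board nn.1 nn.2)], qv.2.insert nn (some cur)))
        (queue, visited)).1, (e.1, e.2.1) = nn) ∧
    (∀ e ∈ queue, e ∈ (ns.foldl
        (fun (qv : List (Int × Int × String) × PySem.Dict (Int × Int) (Option (Int × Int × String))) nn =>
          if qv.2.contains nn then qv
          else (qv.1 ++ [(nn.1, nn.2, pvCell board nn.1 nn.2)], qv.2.insert nn (some cur)))
        (queue, visited)).1) ∧
    (∃ Δ : Nat,
      (ns.foldl
        (fun (qv : List (Int × Int × String) × PySem.Dict (Int × Int) (Option (Int × Int × String))) nn =>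
          if qv.2.contains nn then qv
          else (qv.1 ++ [(nn.1, nn.2, pvCell board nn.1 nn.2)], qv.2.insert nn (some cur)))
        (queue, visited)).1.length = queue.length + Δ ∧
      (ns.foldl
        (fun (qv : List (Int × Int × String) × PySem.Dict (Int × Int) (Option (Int × Int × String))) nn =>
          if qv.2.contains nn then qv
          else (qv.1 ++ [(nn.1, nn.2, pvCell board nn.1 nn.2)], qv.2.insert nn (some cur)))
        (queue, visited)).2.keys.length = visited.keys.length + Δ ∧
      ((ns.foldl
        (fun (qv : List (Int × Int × String) × PySem.Dict (Int × Int) (Option (Int × Int × String))) nn =>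
          if qv.2.contains nn then qv
          else (qv.1 ++ [(nn.1, nn.2, pvCell board nn.1 nn.2)], qv.2.insert nn (some cur)))
        (queue, visited)).1.filter (fun e => pvRc board (e.1, e.2.1))).length
        = (queue.filter (fun e => pvRc board (e.1, e.2.1))).length + Δ) := by
  intro ns
  induction ns with
  | nil =>
    intro queue visited hnd _
    refine ⟨hnd, by simp, by simp, by simp, by simp, 0, by simp⟩
  | cons nn ns ih =>
    intro queue visited hnd hns
    rw [List.foldl_cons]
    by_cases hc : visited.contains nn = true
    · rw [if_pos hc]
      obtain ⟨a, b, c, d, e, Δ, f1, f2, f3⟩ := ih queue visited hnd (fun x hx => hns x (by simp [hx]))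
      have hmem : nn ∈ visited.keys := (PySem.Dict.contains_iff_mem_keys visited nn).mp hc
      refine ⟨a, ?_, ?_, ?_, e, Δ, f1, f2, f3⟩
      · intro k
        rw [b k]
        constructor
        · rintro (h | h)
          · exact Or.inl h
          · exact Or.inr (by simp [h])
        · rintro (h | h)
          · exact Or.inl h
          · rcases List.mem_cons.mp h with rfl | h
            · exact Or.inl hmem
            · exact Or.inr h
      · intro e' he'
        rcases c e' he' with h | ⟨h1, h2, h3⟩
        · exact Or.inl h
        · exact Or.inr ⟨by simp [h1], h2, h3⟩
      · intro nn' hnn'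
        rcases List.mem_cons.mp hnn' with rfl | h
        · exact Or.inl hmem
        · exact d nn' h
    · rw [if_neg (by simp [hc])]
      have hfresh : nn ∉ visited.keys := by
        intro h
        rw [(PySem.Dict.contains_iff_mem_keys visited nn).mpr h] at hc
        exact hc rfl
      have hkeys : (visited.insert nn (some cur)).keys = visited.keys ++ [nn] :=
        PySem.Dict.keys_insert_of_not_contains visited (some cur)
          (by cases h : visited.contains nn with
              | true => exact absurd h hc
              | false => rfl)
      have hnd' : (visited.insert nn (some cur)).keys.Nodup :=
        PySem.Dict.nodup_keys_insert visited nn (some cur) hnd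
      have hrc : pvRc board nn = true := hns nn (by simp)
      obtain ⟨a, b, c, d, e, Δ, f1, f2, f3⟩ :=
        ih (queue ++ [(nn.1, nn.2, pvCell board nn.1 nn.2)]) (visited.insert nn (some cur)) hnd'
          (fun x hx => hns x (by simp [hx]))
      have hnewmem : nn ∈ (List.foldl
          (fun (qv : List (Int × Int × String) × PySem.Dict (Int × Int) (Option (Int × Int × String))) nn =>
            if qv.2.contains nn then qv
            else (qv.1 ++ [(nn.1, nn.2, pvCell board nn.1 nn.2)], qv.2.insert nn (some cur)))
          (queue ++ [(nn.1, nn.2, pvCell board nn.1 nn.2)], visited.insert nn (some cur)) ns).2.keys := by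
        rw [b nn]
        exact Or.inl (by rw [hkeys]; simp)
      refine ⟨a, ?_, ?_, ?_, ?_, Δ + 1, ?_, ?_, ?_⟩
      · intro k
        rw [b k, hkeys]
        simp only [List.mem_append, List.mem_singleton, List.mem_cons]
        tauto
      · intro e' he'
        rcases c e' he' with h | ⟨h1, h2, h3⟩
        · rcases List.mem_append.mp h with h | h
          · exact Or.inl h
          · rw [List.mem_singleton] at h
            subst h
            exact Or.inr ⟨by simp, rfl, by simpa using hnewmem⟩
        · exact Or.inr ⟨by simp [h1], h2, h3⟩
      · intro nn' hnn'
        rcases List.mem_cons.mp hnn' with rfl | h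
        · refine Or.inr ⟨(nn'.1, nn'.2, pvCell board nn'.1 nn'.2), e _ (by simp), by simp⟩
        · rcases d nn' h with hmem | hw
          · rw [hkeys] at hmem
            rcases List.mem_append.mp hmem with hmem | hmem
            · exact Or.inl hmem
            · rw [List.mem_singleton] at hmem
              subst hmem
              exact Or.inr ⟨(nn'.1, nn'.2, pvCell board nn'.1 nn'.2), e _ (by simp), by simp⟩
          · exact Or.inr hw
      · intro e' he'
        exact e e' (by simp [he'])
      · rw [f1]; simp; omega
      · rw [f2, hkeys]; simp; omega
      · rw [f3]
        have : ((queue ++ [(nn.1, nn.2, pvCell board nn.1 nn.2)]).filter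
            (fun e => pvRc board (e.1, e.2.1))).length
            = (queue.filter (fun e => pvRc board (e.1, e.2.1))).length + 1 := by
          rw [List.filter_append]
          simp only [List.length_append]
          have : pvRc board ((nn.1, nn.2, pvCell board nn.1 nn.2).1,
              (nn.1, nn.2, pvCell board nn.1 nn.2).2.1) = true := by
            simpa using hrc
          simp [this]
        rw [this]
        omega

lemma mem_pvGrid_of_bounds (board : List (List String)) (p : Int × Int)
    (h1 : 0 ≤ p.1) (h2 : p.1 < (board.length : Int)) (h3 : 0 ≤ p.2)
    (h4 : p.2 < ((board.headD []).length : Int)) : p ∈ pvGrid board := by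
  simp only [pvGrid, List.mem_flatMap, List.mem_map]
  exact ⟨p.1, by rw [PySem.List.mem_pyRange_one]; exact ⟨h1, h2⟩,
    p.2, by rw [PySem.List.mem_pyRange_one]; exact ⟨h3, h4⟩, rfl⟩

-- ---- A side: the BFS while-loop counts |Reach s| once the queue runs dry ----
lemma pvBfsLoop_spec (board : List (List String))
    (hPre : ∀ row ∈ board, (board.headD []).length ≤ row.length)
    (s : Int × Int)
    (hs1 : 0 ≤ s.1) (hs2 : s.1 < (board.length : Int)) (hs3 : 0 ≤ s.2)
    (hs4 : s.2 < ((board.headD []).length : Int))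
    (hsr : pvCell board s.1 s.2 ≠ "r") (hsh : pvCell board s.1 s.2 ≠ "h")
    (K : List (Int × Int)) (hK1 : K.Nodup) (hK2 : ∀ p, p ∈ K ↔ pvReach board s p) :
    ∀ (fuel : Nat) (queue : List (Int × Int × String))
      (visited : PySem.Dict (Int × Int) (Option (Int × Int × String))) (density : Int),
    visited.keys.Nodup →
    s ∈ visited.keys →
    (∀ k ∈ visited.keys, k = s ∨ pvReach board s k) →
    (∀ e ∈ queue, e.2.2 = pvCell board e.1 e.2.1 ∧ (e.1, e.2.1) ∈ visited.keys ∧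
      ((e.1, e.2.1) = s ∨ pvRc board (e.1, e.2.1) = true)) →
    (∀ k ∈ visited.keys, (∃ e ∈ queue, (e.1, e.2.1) = k) ∨
      ∀ q ∈ pvNbrs k, pvRc board q = true → q ∈ visited.keys) →
    queue.length + (board.length * (board.headD []).length - visited.keys.length) < fuel →
    pvBfsLoop board (pvGraph board) fuel queue visited density
      = density + ((queue.filter (fun e => pvRc board (e.1, e.2.1))).length : Int)
        + (1 + (K.length : Int)) - visited.keys.length := by
  have hsf : pvRc board s = false := by
    cases h : pvRc board s with
    | false => rfl
    | true => exact absurd ((pvRc_iff board s).mp h).2.2.2.2 hsr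
  intro fuel
  induction fuel with
  | zero => intro queue visited density _ _ _ _ _ hμ; omega
  | succ fuel ih =>
    intro queue visited density h1 h2 h3 h4 h6 hμ
    match queue with
    | [] =>
      have hmemiff : ∀ k, k ∈ visited.keys ↔ k ∈ s :: K := by
        intro k
        constructor
        · intro hk
          rcases h3 k hk with rfl | hr
          · simp
          · simp [List.mem_cons, (hK2 k).mpr hr]
        · intro hk
          rcases List.mem_cons.mp hk with rfl | hk
          · exact h2
          · have hr := (hK2 k).mp hk
            clear hk
            induction hr with
            | base q hq hrc =>
              rcases h6 s h2 with ⟨e', he', _⟩ | hclosed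
              · exact absurd he' List.not_mem_nil
              · exact hclosed q hq hrc
            | step p q hp hq hrc ihp =>
              rcases h6 p (ihp (List.mem_cons_of_mem s ((hK2 p).mpr hp))) with ⟨e', he', _⟩ | hclosed
              · exact absurd he' List.not_mem_nil
              · exact hclosed q hq hrc
      have hsk : s ∉ K := by
        intro h
        have := pvReach_rc board s s ((hK2 s).mp h)
        rw [hsf] at this
        exact Bool.false_ne_true this
      have hlen : visited.keys.length = K.length + 1 := by
        have hperm : visited.keys.Perm (s :: K) :=
          (List.perm_ext_iff_of_nodup h1 (List.nodup_cons.mpr ⟨hsk, hK1⟩)).mpr hmemiff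
        simpa using hperm.length_eq
      show pvBfsLoop board (pvGraph board) (fuel + 1) [] visited density = _
      rw [show pvBfsLoop board (pvGraph board) (fuel + 1) [] visited density = density from rfl]
      rw [hlen]
      simp
      omega
    | e :: rest =>
      obtain ⟨he1, he2, he3⟩ := h4 e (by simp)
      have hposb : 0 ≤ e.1 ∧ e.1 < (board.length : Int) ∧ 0 ≤ e.2.1 ∧
          e.2.1 < ((board.headD []).length : Int) := by
        rcases he3 with hps | hrc
        · have hx : e.1 = s.1 := congrArg Prod.fst hps
          have hy : e.2.1 = s.2 := congrArg Prod.snd hps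
          exact ⟨hx ▸ hs1, hx ▸ hs2, hy ▸ hs3, hy ▸ hs4⟩
        · have := (pvRc_iff board _).mp hrc
          exact ⟨this.1, this.2.1, this.2.2.1, this.2.2.2.1⟩
      have hgetD : (pvGraph board).getD (e.1, e.2.1) [] = (pvNbrs (e.1, e.2.1)).filter (pvRc board) := by
        rw [pvGraph_getD board hPre e.1 e.2.1 hposb.1 hposb.2.1 hposb.2.2.1 hposb.2.2.2]
        exact getNextNodes_eq board e.1 e.2.1
      have hcell : rest.length + (board.length * (board.headD []).length - visited.keys.length) < fuel := by
        simp only [List.length_cons] at hμ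
        omega
      obtain ⟨a, b, c, d, ee, Δ, f1, f2, f3⟩ := bfs_enqueue board e
        ((pvNbrs (e.1, e.2.1)).filter (pvRc board)) rest visited h1
        (fun nn h => (List.mem_filter.mp h).2)
      have hkeysub : (((pvNbrs (e.1, e.2.1)).filter (pvRc board)).foldl
          (fun (qv : List (Int × Int × String) × PySem.Dict (Int × Int) (Option (Int × Int × String))) nn =>
            if qv.2.contains nn then qv
            else (qv.1 ++ [(nn.1, nn.2, pvCell board nn.1 nn.2)], qv.2.insert nn (some e)))
          (rest, visited)).2.keys.length ≤ board.length * (board.headD []).length := by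
        refine length_le_grid board _ a ?_
        intro k hk
        rcases (b k).mp hk with hk | hk
        · rcases h3 k hk with rfl | hr
          · exact mem_pvGrid_of_bounds board k hs1 hs2 hs3 hs4
          · exact mem_pvGrid_of_rc board k (pvReach_rc board s k hr)
        · exact mem_pvGrid_of_rc board k (List.mem_filter.mp hk).2
      have hreachpos : (e.1, e.2.1) = s ∨ pvReach board s (e.1, e.2.1) := h3 _ he2
      have hreachns : ∀ nn ∈ (pvNbrs (e.1, e.2.1)).filter (pvRc board), pvReach board s nn := by
        intro nn hnn
        obtain ⟨hmem, hrc⟩ := List.mem_filter.mp hnn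
        rcases hreachpos with hps | hr
        · exact pvReach.base nn (hps ▸ hmem) hrc
        · exact pvReach.step _ nn hr hmem hrc
      have hrec := ih (((pvNbrs (e.1, e.2.1)).filter (pvRc board)).foldl
          (fun (qv : List (Int × Int × String) × PySem.Dict (Int × Int) (Option (Int × Int × String))) nn =>
            if qv.2.contains nn then qv
            else (qv.1 ++ [(nn.1, nn.2, pvCell board nn.1 nn.2)], qv.2.insert nn (some e)))
          (rest, visited)).1
        (((pvNbrs (e.1, e.2.1)).filter (pvRc board)).foldl
          (fun (qv : List (Int × Int × String) × PySem.Dict (Int × Int) (Option (Int × Int × String))) nn =>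
            if qv.2.contains nn then qv
            else (qv.1 ++ [(nn.1, nn.2, pvCell board nn.1 nn.2)], qv.2.insert nn (some e)))
          (rest, visited)).2
        (if pvRc board (e.1, e.2.1) = true then density + 1 else density)
        a
        ((b s).mpr (Or.inl h2))
        (by
          intro k hk
          rcases (b k).mp hk with hk | hk
          · exact h3 k hk
          · exact Or.inr (hreachns k hk))
        (by
          intro e' he'
          rcases c e' he' with he' | ⟨hp1, hp2, hp3⟩
          · obtain ⟨g1, g2, g3⟩ := h4 e' (by simp [he'])
            exact ⟨g1, (b _).mpr (Or.inl g2), g3⟩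
          · exact ⟨hp2, hp3, Or.inr (List.mem_filter.mp hp1).2⟩)
        (by
          intro k hk
          by_cases hkpos : k = (e.1, e.2.1)
          · subst hkpos
            refine Or.inr ?_
            intro q hq hrcq
            exact (b q).mpr (Or.inr (List.mem_filter.mpr ⟨hq, hrcq⟩))
          · by_cases hkold : k ∈ visited.keys
            · rcases h6 k hkold with ⟨e', he', hpe'⟩ | hclosed
              · rcases List.mem_cons.mp he' with rfl | he'
                · exact absurd hpe'.symm hkpos
                · exact Or.inl ⟨e', ee e' he', hpe'⟩
              · exact Or.inr (fun q hq hrcq => (b q).mpr (Or.inl (hclosed q hq hrcq)))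
            · have hkns : k ∈ (pvNbrs (e.1, e.2.1)).filter (pvRc board) :=
                ((b k).mp hk).resolve_left hkold
              rcases d k hkns with hkold' | ⟨e', he', hpe'⟩
              · exact absurd hkold' hkold
              · exact Or.inl ⟨e', he', hpe'⟩)
        (by rw [f1, f2]; omega)
      have hstep : pvBfsLoop board (pvGraph board) (fuel + 1) (e :: rest) visited density
          = pvBfsLoop board (pvGraph board) fuel
              (((pvNbrs (e.1, e.2.1)).filter (pvRc board)).foldl
                (fun (qv : List (Int × Int × String) × PySem.Dict (Int × Int) (Option (Int × Int × String))) nn =>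
                  if qv.2.contains nn then qv
                  else (qv.1 ++ [(nn.1, nn.2, pvCell board nn.1 nn.2)], qv.2.insert nn (some e)))
                (rest, visited)).1
              (((pvNbrs (e.1, e.2.1)).filter (pvRc board)).foldl
                (fun (qv : List (Int × Int × String) × PySem.Dict (Int × Int) (Option (Int × Int × String))) nn =>
                  if qv.2.contains nn then qv
                  else (qv.1 ++ [(nn.1, nn.2, pvCell board nn.1 nn.2)], qv.2.insert nn (some e)))
                (rest, visited)).2
              (if pvRc board (e.1, e.2.1) = true then density + 1 else density) := by
        have hneh : (e.2.2 == "h") = false := by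
          rcases he3 with hps | hrc
          · have hx : e.1 = s.1 := congrArg Prod.fst hps
            have hy : e.2.1 = s.2 := congrArg Prod.snd hps
            rw [he1, hx, hy]
            exact beq_eq_false_iff_ne.mpr hsh
          · rw [he1, ((pvRc_iff board _).mp hrc).2.2.2.2]
            decide
        have hrval : (e.2.2 == "r") = pvRc board (e.1, e.2.1) := by
          rcases he3 with hps | hrc
          · have hx : e.1 = s.1 := congrArg Prod.fst hps
            have hy : e.2.1 = s.2 := congrArg Prod.snd hps
            rw [he1, hx, hy, Prod.mk.eta, hsf]
            exact beq_eq_false_iff_ne.mpr hsr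
          · rw [he1, ((pvRc_iff board _).mp hrc).2.2.2.2, hrc]
            decide
        simp only [pvBfsLoop, hneh, Bool.false_eq_true, if_false, hgetD, hrval]
      rw [hstep, hrec]
      have hfcons : ((e :: rest).filter (fun e => pvRc board (e.1, e.2.1))).length
          = (rest.filter (fun e => pvRc board (e.1, e.2.1))).length
            + (if pvRc board (e.1, e.2.1) = true then 1 else 0) := by
        rw [List.filter_cons]
        by_cases h : pvRc board (e.1, e.2.1) = true <;> simp [h]
      rw [f2, f3, hfcons]
      by_cases h : pvRc board (e.1, e.2.1) = true <;> simp [h] <;> omega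

lemma pvBfsSum_spec (board : List (List String))
    (hPre : ∀ row ∈ board, (board.headD []).length ≤ row.length) (sr sc : Int)
    (hs1 : 0 ≤ sr) (hs2 : sr < (board.length : Int)) (hs3 : 0 ≤ sc)
    (hs4 : sc < ((board.headD []).length : Int))
    (hsr : pvCell board sr sc ≠ "r") (hsh : pvCell board sr sc ≠ "h")
    (K : List (Int × Int)) (hK1 : K.Nodup) (hK2 : ∀ p, p ∈ K ↔ pvReach board (sr, sc) p) :
    pvBfsSum sr sc board = K.length := by
  have hkeys : (PySem.Dict.empty.insert ((sr, sc) : Int × Int)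
      (none : Option (Int × Int × String))).keys = [(sr, sc)] := by
    rw [PySem.Dict.keys_insert_of_not_contains PySem.Dict.empty none (by rfl)]
    rfl
  have hsf : pvRc board (sr, sc) = false := by
    cases h : pvRc board (sr, sc) with
    | false => rfl
    | true => exact absurd ((pvRc_iff board (sr, sc)).mp h).2.2.2.2 hsr
  have := pvBfsLoop_spec board hPre (sr, sc) hs1 hs2 hs3 hs4 hsr hsh K hK1 hK2
    (board.length * (board.headD []).length + 2)
    [(sr, sc, pvCell board sr sc)]
    (PySem.Dict.empty.insert (sr, sc) none) 0
    (by rw [hkeys]; exact List.nodup_singleton _)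
    (by rw [hkeys]; simp)
    (by rw [hkeys]; intro k hk; exact Or.inl (List.mem_singleton.mp hk))
    (by
      intro e' he'
      rw [List.mem_singleton] at he'
      subst he'
      exact ⟨rfl, by rw [hkeys]; simp, Or.inl rfl⟩)
    (by
      intro k hk
      rw [hkeys] at hk
      cases List.mem_singleton.mp hk
      exact Or.inl ⟨(sr, sc, pvCell board sr sc), by simp, rfl⟩)
    (by rw [hkeys]; simp; omega)
  rw [pvBfsSum, this, hkeys]
  have hf : ([((sr : Int), (sc : Int), pvCell board sr sc)].filter
      (fun e => pvRc board (e.1, e.2.1))).length = 0 := by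
    simp [hsf]
  rw [hf]
  simp

-- ---- aggregation layer: both programs summed over the player cells ----
def pvPCells (board : List (List String)) : List (Int × Int) :=
  (pvGrid board).filter (fun p => pvIsPlayer (pvCell board p.1 p.2))

def pvDictB (board : List (List String)) : PySem.Dict String Int :=
  (pvPCells board).foldl
    (fun d p => d.insert (pvCell board p.1 p.2)
      (d.getD (pvCell board p.1 p.2) 0
        + pvMass board board.length (board.headD []).length p.1 p.2))
    PySem.Dict.empty

lemma bounds_of_mem_pvGrid (board : List (List String)) (p : Int × Int) (hp : p ∈ pvGrid board) :
    0 ≤ p.1 ∧ p.1 < (board.length : Int) ∧ 0 ≤ p.2 ∧ p.2 < ((board.headD []).length : Int) := by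
  simp only [pvGrid, List.mem_flatMap, List.mem_map] at hp
  obtain ⟨x, hx, y, hy, rfl⟩ := hp
  rw [PySem.List.mem_pyRange_one] at hx hy
  exact ⟨hx.1, hx.2, hy.1, hy.2⟩

lemma cell_bfs_eq_mass (board : List (List String))
    (hPre : ∀ row ∈ board, (board.headD []).length ≤ row.length) (sr sc : Int)
    (hs1 : 0 ≤ sr) (hs2 : sr < (board.length : Int)) (hs3 : 0 ≤ sc)
    (hs4 : sc < ((board.headD []).length : Int))
    (hplayer : pvIsPlayer (pvCell board sr sc) = true) :
    pvBfsSum sr sc board = pvMass board board.length (board.headD []).length sr sc := by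
  have hsr : pvCell board sr sc ≠ "r" := by
    intro h
    rw [h] at hplayer
    exact absurd hplayer (by decide)
  have hsh : pvCell board sr sc ≠ "h" := by
    intro h
    rw [h] at hplayer
    exact absurd hplayer (by decide)
  obtain ⟨K, hK1, hK2, hK3⟩ := pvMass_spec board sr sc
  rw [hK3]
  exact pvBfsSum_spec board hPre sr sc hs1 hs2 hs3 hs4 hsr hsh K hK1 hK2

lemma grid_fold_players (board : List (List String)) :
    pvGetAllPlayers board = (pvPCells board).map (fun p => pvCell board p.1 p.2) := by
  have hflat : (pvGrid board).foldl
      (fun players (p : Int × Int) =>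
        match PySem.Int.ofStr? (pvCell board p.1 p.2) with
        | some _ => players ++ [pvCell board p.1 p.2]
        | none => players) ([] : List String)
      = pvGetAllPlayers board := by
    simp only [pvGrid, List.foldl_flatMap, List.foldl_map]
    rfl
  rw [← hflat]
  have hcongr := PySem.List.foldl_congr_mem
    (l := pvGrid board) (init := ([] : List String))
    (f := fun players (p : Int × Int) =>
      match PySem.Int.ofStr? (pvCell board p.1 p.2) with
      | some _ => players ++ [pvCell board p.1 p.2]
      | none => players)
    (g := fun players (p : Int × Int) =>
      if pvIsPlayer (pvCell board p.1 p.2) then players ++ [pvCell board p.1 p.2] else players)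
    (by
      intro acc p _
      cases h : PySem.Int.ofStr? (pvCell board p.1 p.2) <;>
        simp [pvIsPlayer, h])
  rw [hcongr, PySem.List.foldl_append_if]
  rfl

lemma checkDensity_eq (board : List (List String)) (p0 : String) :
    pvCheckDensity board p0
      = (((pvGrid board).filter (fun p => pvCell board p.1 p.2 == p0)).map
          (fun p => pvBfsSum p.1 p.2 board)).sum := by
  have hflat : (pvGrid board).foldl
      (fun density (p : Int × Int) =>
        if pvCell board p.1 p.2 == p0 then density + pvBfsSum p.1 p.2 board else density) 0
      = pvCheckDensity board p0 := by
    simp only [pvGrid, List.foldl_flatMap, List.foldl_map]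
    rfl
  rw [← hflat, PySem.List.foldl_if_eq_foldl_filter, PySem.List.foldl_add]
  simp

lemma getD_weight (board : List (List String)) (w : Int × Int → Int) :
    ∀ (l : List (Int × Int)) (d : PySem.Dict String Int) (v : String),
    (l.foldl (fun d p => d.insert (pvCell board p.1 p.2)
        (d.getD (pvCell board p.1 p.2) 0 + w p)) d).getD v 0
      = d.getD v 0 + ((l.filter (fun p => pvCell board p.1 p.2 == v)).map w).sum := by
  intro l
  induction l with
  | nil => intro d v; simp
  | cons p l ih =>
    intro d v
    rw [List.foldl_cons, ih, PySem.Dict.getD_insert]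
    by_cases h : v = pvCell board p.1 p.2
    · rw [if_pos h, List.filter_cons_of_pos (by simp [h.symm]), List.map_cons, List.sum_cons, h]
      ring
    · rw [if_neg h, List.filter_cons_of_neg (by
        simp only [beq_iff_eq]
        exact fun hh => h hh.symm)]

lemma dictB_eq_checkDensity (board : List (List String))
    (hPre : ∀ row ∈ board, (board.headD []).length ≤ row.length) (v : String)
    (hv : pvIsPlayer v = true) :
    (pvDictB board).getD v 0 = pvCheckDensity board v := by
  rw [pvDictB, getD_weight, PySem.Dict.getD_empty, checkDensity_eq]
  have hfil : (pvPCells board).filter (fun p => pvCell board p.1 p.2 == v)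
      = (pvGrid board).filter (fun p => pvCell board p.1 p.2 == v) := by
    rw [pvPCells, List.filter_filter]
    apply List.filter_congr
    intro p _
    by_cases h : pvCell board p.1 p.2 = v
    · simp [h, hv]
    · simp [h]
  rw [hfil]
  have hmap : ((pvGrid board).filter (fun p => pvCell board p.1 p.2 == v)).map
        (fun p => pvBfsSum p.1 p.2 board)
      = ((pvGrid board).filter (fun p => pvCell board p.1 p.2 == v)).map
        (fun p => pvMass board board.length (board.headD []).length p.1 p.2) := by
    apply List.map_congr_left
    intro p hp
    obtain ⟨hg, hc⟩ := List.mem_filter.mp hp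
    obtain ⟨b1, b2, b3, b4⟩ := bounds_of_mem_pvGrid board p hg
    exact cell_bfs_eq_mass board hPre p.1 p.2 b1 b2 b3 b4
      (by rw [eq_of_beq hc]; exact hv)
  rw [hmap]
  ring

lemma alt_unfold (board : List (List String)) (player : String)
    (hb : (board.length == 0) = false) :
    difference_of_density_alt board player
      = (pvGetAllPlayers board).foldl
          (fun acc v => acc + (if v == player then (pvDictB board).getD v 0
            else -((pvDictB board).getD v 0))) 0 := by
  have hst : (PySem.List.pyRange 0 (board.length : Int) 1).foldl
      (fun (st : List String × PySem.Dict String Int) r =>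
        (PySem.List.pyRange 0 ((board.headD []).length : Int) 1).foldl (fun st c =>
          if pvIsPlayer (pvCell board r c) then
            (st.1 ++ [pvCell board r c],
             st.2.insert (pvCell board r c)
               (st.2.getD (pvCell board r c) 0
                 + pvMass board (board.length : Int) ((board.headD []).length : Int) r c))
          else st) st)
      ([], PySem.Dict.empty)
      = (pvGetAllPlayers board, pvDictB board) := by
    have hflat : (pvGrid board).foldl
        (fun (st : List String × PySem.Dict String Int) (p : Int × Int) =>
          if pvIsPlayer (pvCell board p.1 p.2) then
            (st.1 ++ [pvCell board p.1 p.2],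
             st.2.insert (pvCell board p.1 p.2)
               (st.2.getD (pvCell board p.1 p.2) 0
                 + pvMass board (board.length : Int) ((board.headD []).length : Int) p.1 p.2))
          else st)
        ([], PySem.Dict.empty)
        = (PySem.List.pyRange 0 (board.length : Int) 1).foldl
          (fun (st : List String × PySem.Dict String Int) r =>
            (PySem.List.pyRange 0 ((board.headD []).length : Int) 1).foldl (fun st c =>
              if pvIsPlayer (pvCell board r c) then
                (st.1 ++ [pvCell board r c],
                 st.2.insert (pvCell board r c)
                   (st.2.getD (pvCell board r c) 0
                     + pvMass board (board.length : Int) ((board.headD []).length : Int) r c))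
              else st) st)
          ([], PySem.Dict.empty) := by
      simp only [pvGrid, List.foldl_flatMap, List.foldl_map]
    rw [← hflat]
    have hcongr := PySem.List.foldl_congr_mem
      (l := pvGrid board) (init := (([], PySem.Dict.empty) : List String × PySem.Dict String Int))
      (f := fun (st : List String × PySem.Dict String Int) (p : Int × Int) =>
        if pvIsPlayer (pvCell board p.1 p.2) then
          (st.1 ++ [pvCell board p.1 p.2],
           st.2.insert (pvCell board p.1 p.2)
             (st.2.getD (pvCell board p.1 p.2) 0
               + pvMass board (board.length : Int) ((board.headD []).length : Int) p.1 p.2))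
        else st)
      (g := fun (st : List String × PySem.Dict String Int) (p : Int × Int) =>
        ((fun (s1 : List String) (p : Int × Int) =>
            if pvIsPlayer (pvCell board p.1 p.2) then s1 ++ [pvCell board p.1 p.2] else s1) st.1 p,
         (fun (s2 : PySem.Dict String Int) (p : Int × Int) =>
            if pvIsPlayer (pvCell board p.1 p.2) then
              s2.insert (pvCell board p.1 p.2)
                (s2.getD (pvCell board p.1 p.2) 0
                  + pvMass board (board.length : Int) ((board.headD []).length : Int) p.1 p.2)
            else s2) st.2 p))
      (by
        intro acc p _
        by_cases h : pvIsPlayer (pvCell board p.1 p.2) <;> simp [h])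
    rw [hcongr, PySem.List.foldl_prod_mk
      (f := fun (s1 : List String) (p : Int × Int) =>
        if pvIsPlayer (pvCell board p.1 p.2) then s1 ++ [pvCell board p.1 p.2] else s1)
      (g := fun (s2 : PySem.Dict String Int) (p : Int × Int) =>
        if pvIsPlayer (pvCell board p.1 p.2) then
          s2.insert (pvCell board p.1 p.2)
            (s2.getD (pvCell board p.1 p.2) 0
              + pvMass board (board.length : Int) ((board.headD []).length : Int) p.1 p.2)
        else s2)]
    rw [Prod.mk.injEq]
    constructor
    · rw [grid_fold_players, PySem.List.foldl_append_if]
      rfl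
    · rw [PySem.List.foldl_if_eq_foldl_filter]
      rfl
  simp only [difference_of_density_alt, hb, Bool.false_eq_true, if_false, hst]

-- ===== VERDICT (by name: the statement is the Claim_ definition above) =====
theorem difference_of_density_spec : Claim_equal_difference_of_density := by
  intro board player _ hPre
  show difference_of_density board player = difference_of_density_alt board player
  by_cases hb : board.length = 0
  · cases List.length_eq_zero_iff.mp hb
    rfl
  · rw [alt_unfold board player (by simp [hb])]
    rw [difference_of_density]
    apply PySem.List.foldl_congr_mem
    intro acc v hv
    have hvP : pvIsPlayer v = true := by
      rw [grid_fold_players] at hv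
      obtain ⟨p, hp, rfl⟩ := List.mem_map.mp hv
      exact (List.mem_filter.mp hp).2
    have hCD : pvCheckDensity board v = (pvDictB board).getD v 0 :=
      (dictB_eq_checkDensity board hPre v hvP).symm
    by_cases hvp : (v == player) = true
    · rw [if_pos hvp, if_pos hvp, hCD]
    · rw [if_neg (by simp [hvp]), if_neg (by simp [hvp]), hCD]
      ring
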